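-- pv_equiv track=rewrite | github.com/loongx2/python_code_exp | python_examples/wordproblems.py | almost_palindromes
-- ===== SOURCE A (Python) =====
-- def almost_palindromes(words):
--     """
--     Find words that become palindromes when exactly one character is removed
--
--     Args:
--         words: List of strings to analyze
--
--     Returns:
--         List of words that are one character away from being palindromes
--
--     Time Complexity: O(n×m²) where n=words, m=average word length
--     Algorithm:
--     1. Skip actual palindromes (already perfect)
--     2. For each position i, create word with character i removed
--     3. Check if resulting word is palindromic
--     4. Only consider words longer than 2 characters
--     """
--     def almost(word):
--         """Helper function to check if word is almost palindromic"""
--         # Words that are already palindromes don't count.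
--         if word != word[::-1]:
--             # Loop through the positions to remove a character.
--             for i in range(len(word)):
--                 w2 = word[:i] + word[i+1:]  # Remove character at position i
--                 if w2 == w2[::-1]:  # Check if result is palindromic
--                     return True
--         return False
--
--     return [w for w in words if len(w) > 2 and almost(w)]  # Filter by length
-- ===== SOURCE B (Python) =====
-- def almost_palindromes(words):
--     def almost(w):
--         # Peel equal end characters; at the first mismatch the word is
--         # almost-palindromic iff dropping either mismatched end leaves a palindrome.
--         if len(w) < 2:
--             return False  # fully peeled: w was a palindrome, does not count
--         if w[0] == w[-1]:
--             return almost(w[1:-1])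
--         t, h = w[1:], w[:-1]
--         return t == t[::-1] or h == h[::-1]
--     return [w for w in words if len(w) > 2 and almost(w)]
-- ===== Notes on version B (the rewrite author's own statement) =====
-- stated objective: faster
-- what changed: B replaces A's scan that deletes every position and reverses the remainder by peeling equal end characters two-pointer style and testing only the two candidate deletions at the first mismatch.
import Mathlib
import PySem

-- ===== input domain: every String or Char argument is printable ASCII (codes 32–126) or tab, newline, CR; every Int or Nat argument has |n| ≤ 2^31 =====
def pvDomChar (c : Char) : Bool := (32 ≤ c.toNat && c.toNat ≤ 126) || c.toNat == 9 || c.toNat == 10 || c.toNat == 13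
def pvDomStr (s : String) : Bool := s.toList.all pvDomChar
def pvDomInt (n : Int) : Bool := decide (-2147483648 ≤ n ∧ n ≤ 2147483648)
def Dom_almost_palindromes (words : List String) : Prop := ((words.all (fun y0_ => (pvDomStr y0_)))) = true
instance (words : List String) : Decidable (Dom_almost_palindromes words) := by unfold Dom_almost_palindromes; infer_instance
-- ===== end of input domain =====

-- B replaces A's try-every-deletion scan by peeling equal end characters and testing
-- only the two deletions at the first mismatch (objective: faster on non-palindromic words).

-- ===== PORT A =====
-- A's helper `almost`: word[::-1] is List.reverse (PySem.List.slice?_none_none_neg_one);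
-- word[:i] is take i and word[i+1:] is drop (i+1) for the in-range i of range(len(word))
-- (PySem.List.slice_to_natCast / slice_from_natCast); the for-loop with early `return True`
-- is `any` over range(len(word)).
def pvAlmostA (l : List Char) : Bool :=
  if l = l.reverse then false
  else (List.range l.length).any (fun i =>
    let w2 := l.take i ++ l.drop (i+1)
    decide (w2 = w2.reverse))

def almost_palindromes (words : List String) : List String :=
  words.filter (fun w => decide (2 < w.toList.length) && pvAlmostA w.toList)

-- ===== PORT B =====
-- B's helper `almost`: w[0] / w[-1] are head? / getLast? (both defined since len ≥ 2),
-- w[1:-1] = (drop 1).dropLast, w[1:] = drop 1, w[:-1] = dropLast, s[::-1] = reverse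
-- (PySem.List.slice_from_one / slice_to_neg_one / slice?_none_none_neg_one).
def pvAlmostB (w : List Char) : Bool :=
  if w.length < 2 then false
  else if w.head? = w.getLast? then pvAlmostB ((w.drop 1).dropLast)
  else
    let t := w.drop 1
    let h := w.dropLast
    decide (t = t.reverse) || decide (h = h.reverse)
termination_by w.length
decreasing_by simp [List.length_dropLast]; omega

def almost_palindromes_alt (words : List String) : List String :=
  words.filter (fun w => decide (2 < w.toList.length) && pvAlmostB w.toList)

-- ===== PRECONDITION & SPEC =====
def Spec_almost_palindromes (words : List String) (out : List String) : Prop := out = almost_palindromes_alt words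
instance (words : List String) (out : List String) : Decidable (Spec_almost_palindromes words out) := by unfold Spec_almost_palindromes; infer_instance

-- ===== CLAIM (what is proved, stated in full; the proofs are below) =====
def Claim_equal_almost_palindromes : Prop := ∀ (words : List String), Dom_almost_palindromes words → Spec_almost_palindromes words (almost_palindromes words)

-- ===== LEMMAS AND PROOFS =====

/-- the word with the character at position k removed, as A builds it -/
def pvDelAt (l : List Char) (k : Nat) : List Char := l.take k ++ l.drop (k+1)

/-- "l is a non-palindrome that becomes a palindrome after removing one character" -/
def pvAP (l : List Char) : Prop :=
  ¬ (l = l.reverse) ∧ ∃ k < l.length, pvDelAt l k = (pvDelAt l k).reverse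

theorem pv_rev_sandwich (a b : Char) (x : List Char) :
    (a :: (x ++ [b])).reverse = b :: (x.reverse ++ [a]) := by
  simp

theorem pv_pal_sandwich (a : Char) (x : List Char) :
    a :: (x ++ [a]) = (a :: (x ++ [a])).reverse ↔ x = x.reverse := by
  rw [pv_rev_sandwich]; simp

theorem pv_pal_ends (a b : Char) (x : List Char)
    (h : a :: (x ++ [b]) = (a :: (x ++ [b])).reverse) : a = b := by
  rw [pv_rev_sandwich] at h
  exact (List.cons_eq_cons.mp h).1

theorem pv_delAt_zero (a : Char) (x : List Char) : pvDelAt (a :: x) 0 = x := by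
  simp [pvDelAt]

theorem pv_delAt_concat (x : List Char) (b : Char) : pvDelAt (x ++ [b]) x.length = x := by
  simp [pvDelAt]

theorem pv_delAt_mid (a b : Char) (x : List Char) (k : Nat)
    (hk : k < x.length) :
    pvDelAt (a :: (x ++ [b])) (k+1) = a :: (pvDelAt x k ++ [b]) := by
  simp only [pvDelAt, List.take_succ_cons, List.drop_succ_cons]
  rw [List.take_append_of_le_length (by omega),
      List.drop_append_of_le_length (by omega)]
  simp

/-- structure of a list of length ≥ 2 -/
theorem pv_two_struct (l : List Char) (h : 2 ≤ l.length) :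
    ∃ a x b, l = a :: (x ++ [b]) := by
  match l with
  | [] => simp at h
  | [a] => simp at h
  | a :: t =>
    have ht : t ≠ [] := by intro he; subst he; simp at h
    obtain ⟨x, b, hx⟩ := List.eq_nil_or_concat t |>.resolve_left ht
    exact ⟨a, x, b, by rw [hx, List.concat_eq_append]⟩

/-- a palindrome of the form x ++ [a] with x non-palindromic yields x = a :: pal -/
theorem pv_pal_snoc (a : Char) (x : List Char)
    (hpal : x ++ [a] = (x ++ [a]).reverse) (hx : ¬ x = x.reverse) :
    ∃ x₂, x = a :: x₂ ∧ x₂ = x₂.reverse := by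
  have hxne : x ≠ [] := by intro he; subst he; simp at hx
  obtain ⟨c, x₂, rfl⟩ := List.exists_cons_of_ne_nil hxne
  rw [List.reverse_append] at hpal
  simp at hpal
  obtain ⟨h1, h2, -⟩ := hpal
  exact ⟨x₂, by rw [h1], h2⟩

/-- a palindrome of the form a :: x with x non-palindromic yields x = pal ++ [a] -/
theorem pv_pal_cons (a : Char) (x : List Char)
    (hpal : a :: x = (a :: x).reverse) (hx : ¬ x = x.reverse) :
    ∃ x₂, x = x₂ ++ [a] ∧ x₂ = x₂.reverse := by
  have hxne : x ≠ [] := by intro he; subst he; simp at hx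
  obtain ⟨x₂, c, rfl⟩ := List.eq_nil_or_concat x |>.resolve_left hxne
  simp only [List.concat_eq_append] at hpal hx ⊢
  rw [pv_rev_sandwich] at hpal
  obtain ⟨h1, h2⟩ := List.cons_eq_cons.mp hpal
  subst h1
  refine ⟨x₂, rfl, ?_⟩
  simpa using h2

/-- characterisation of A's helper -/
theorem pv_charA (l : List Char) : pvAlmostA l = true ↔ pvAP l := by
  unfold pvAlmostA pvAP pvDelAt
  split
  · rename_i h
    constructor
    · intro hf; exact absurd hf (by decide)
    · rintro ⟨hnp, -⟩; exact absurd h hnp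
  · simp only [List.any_eq_true, List.mem_range, decide_eq_true_eq]
    constructor
    · rintro ⟨i, hi, hw⟩; exact ⟨by assumption, i, hi, hw⟩
    · rintro ⟨-, i, hi, hw⟩; exact ⟨i, hi, hw⟩

/-- key step: peeling matched end characters preserves pvAP -/
theorem pv_AP_peel (a : Char) (x : List Char) :
    pvAP (a :: (x ++ [a])) ↔ pvAP x := by
  unfold pvAP
  constructor
  · rintro ⟨hnp, k, hk, hpal⟩
    have hnpx : ¬ x = x.reverse := fun h => hnp ((pv_pal_sandwich a x).mpr h)
    refine ⟨hnpx, ?_⟩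
    rcases Nat.eq_or_lt_of_le (Nat.zero_le k) with h0 | hpos
    · -- k = 0 : x ++ [a] is a palindrome
      subst h0
      rw [pv_delAt_zero] at hpal
      obtain ⟨x₂, hx2, hx2p⟩ := pv_pal_snoc a x hpal hnpx
      refine ⟨0, ?_, ?_⟩
      · subst hx2; simp
      · rw [hx2, pv_delAt_zero]; exact hx2p
    · rcases Nat.lt_or_ge k (x.length + 1) with hmid | hlast
      · -- 1 ≤ k ≤ x.length : interior deletion
        obtain ⟨k', rfl⟩ := Nat.exists_eq_add_of_lt hpos
        simp only [Nat.zero_add] at *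
        have hk' : k' < x.length := by omega
        rw [pv_delAt_mid a a x k' hk'] at hpal
        exact ⟨k', hk', (pv_pal_sandwich a _).mp hpal⟩
      · -- k = x.length + 1 : a :: x is a palindrome
        have hkl : k = x.length + 1 := by
          simp only [List.length_cons, List.length_append, List.length_nil] at hk; omega
        subst hkl
        rw [show a :: (x ++ [a]) = (a :: x) ++ [a] by simp,
            show x.length + 1 = (a :: x).length by simp,
            pv_delAt_concat] at hpal
        obtain ⟨x₂, hx2, hx2p⟩ := pv_pal_cons a x hpal hnpx
        refine ⟨x₂.length, ?_, ?_⟩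
        · subst hx2; simp
        · rw [hx2, pv_delAt_concat]; exact hx2p
  · rintro ⟨hnpx, k, hk, hpal⟩
    refine ⟨fun h => hnpx ((pv_pal_sandwich a x).mp h), k + 1, ?_, ?_⟩
    · simp only [List.length_cons, List.length_append, List.length_nil]; omega
    · rw [pv_delAt_mid a a x k hk]
      exact (pv_pal_sandwich a _).mpr hpal

/-- mismatch step: at unequal ends, pvAP means one of the two end deletions works -/
theorem pv_AP_mismatch (a b : Char) (x : List Char) (hab : a ≠ b) :
    pvAP (a :: (x ++ [b])) ↔
      (x ++ [b] = (x ++ [b]).reverse ∨ a :: x = (a :: x).reverse) := by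
  unfold pvAP
  constructor
  · rintro ⟨-, k, hk, hpal⟩
    rcases Nat.eq_or_lt_of_le (Nat.zero_le k) with h0 | hpos
    · subst h0; rw [pv_delAt_zero] at hpal; exact Or.inl hpal
    · rcases Nat.lt_or_ge k (x.length + 1) with hmid | hlast
      · obtain ⟨k', rfl⟩ := Nat.exists_eq_add_of_lt hpos
        simp only [Nat.zero_add] at *
        have hk' : k' < x.length := by omega
        rw [pv_delAt_mid a b x k' hk'] at hpal
        exact absurd (pv_pal_ends a b _ hpal) hab
      · have hkl : k = x.length + 1 := by
          simp only [List.length_cons, List.length_append, List.length_nil] at hk; omega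
        subst hkl
        rw [show a :: (x ++ [b]) = (a :: x) ++ [b] by simp,
            show x.length + 1 = (a :: x).length by simp,
            pv_delAt_concat] at hpal
        exact Or.inr hpal
  · intro h
    refine ⟨fun hpal => hab (pv_pal_ends a b x hpal), ?_⟩
    rcases h with h | h
    · exact ⟨0, by simp, by rw [pv_delAt_zero]; exact h⟩
    · refine ⟨x.length + 1, by simp, ?_⟩
      rw [show a :: (x ++ [b]) = (a :: x) ++ [b] by simp,
          show x.length + 1 = (a :: x).length by simp,
          pv_delAt_concat]
      exact h

/-- characterisation of B's helper -/
theorem pv_charB (l : List Char) : pvAlmostB l = true ↔ pvAP l := by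
  induction l using pvAlmostB.induct with
  | case1 w hlt =>
    rw [pvAlmostB]
    simp only [if_pos hlt]
    unfold pvAP
    constructor
    · intro h; exact absurd h (by decide)
    · rintro ⟨hnp, -⟩
      exfalso; apply hnp
      match w, hlt with
      | [], _ => rfl
      | [c], _ => rfl
  | case2 w hlt heq ih =>
    obtain ⟨a, x, b, rfl⟩ := pv_two_struct w (by omega)
    have hha : (a :: (x ++ [b])).head? = some a := rfl
    have hgl : (a :: (x ++ [b])).getLast? = some b := by
      rw [show a :: (x ++ [b]) = (a :: x) ++ [b] by simp, List.getLast?_concat]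
    have hab : a = b := by rw [hha, hgl] at heq; exact Option.some_inj.mp heq
    subst hab
    rw [pvAlmostB]
    simp only [if_neg hlt, if_pos heq]
    have hmid : ((a :: (x ++ [a])).drop 1).dropLast = x := by simp
    rw [hmid] at ih ⊢
    rw [ih]
    exact (pv_AP_peel a x).symm
  | case3 w hlt hne =>
    obtain ⟨a, x, b, rfl⟩ := pv_two_struct w (by omega)
    have hha : (a :: (x ++ [b])).head? = some a := rfl
    have hgl : (a :: (x ++ [b])).getLast? = some b := by
      rw [show a :: (x ++ [b]) = (a :: x) ++ [b] by simp, List.getLast?_concat]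
    have hab : a ≠ b := by
      intro h; apply hne; rw [hha, hgl, h]
    rw [pvAlmostB]
    simp only [if_neg hlt, if_neg hne]
    have ht : (a :: (x ++ [b])).drop 1 = x ++ [b] := by simp
    have hh : (a :: (x ++ [b])).dropLast = a :: x := by
      rw [show a :: (x ++ [b]) = (a :: x) ++ [b] by simp, List.dropLast_concat]
    rw [ht, hh]
    rw [pv_AP_mismatch a b x hab]
    simp

theorem pv_almost_eq (l : List Char) : pvAlmostA l = pvAlmostB l := by
  have hA := pv_charA l
  have hB := pv_charB l
  cases h1 : pvAlmostA l <;> cases h2 : pvAlmostB l <;> simp_all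

-- ===== VERDICT (by name: the statement is the Claim_ definition above) =====
theorem almost_palindromes_spec : Claim_equal_almost_palindromes := by
  intro words _
  unfold Spec_almost_palindromes almost_palindromes almost_palindromes_alt
  exact List.filter_congr (fun w _ => by rw [pv_almost_eq])
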